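-- pv_equiv track=rewrite | github.com/MiguelC23/XAI-Skin-Cancer-Detection-A-Prototype-Based-Deep-Learning-Architecture-with-Non-Expert-Supervision | ACP_BM_Problem/Patches_EDEASD_closer_to_PX_concept_analysis.py | find_most_common_keys
-- ===== SOURCE A (Python) =====
-- def find_most_common_keys(dictionaries):
--     key_counter = {}
--     for dictionary in dictionaries:
--         keys_seen = set()
--         for key in dictionary.keys():
--             if key not in keys_seen:
--                 key_counter[key] = key_counter.get(key, 0) + 1
--                 keys_seen.add(key)
--
--     most_common_keys = []
--     max_count = 0
--     for key, count in key_counter.items():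
--         if count > max_count:
--             most_common_keys = [key]
--             max_count = count
--         elif count == max_count:
--             most_common_keys.append(key)
--
--     return most_common_keys,max_count
-- ===== SOURCE B (Python) =====
-- def find_most_common_keys(dictionaries):
--     # Divide and conquer: count keys by recursively merging the counts of the two
--     # halves (dict.fromkeys at the leaves), then take the max and filter in two passes.
--     def counts_of(ds):
--         if not ds:
--             return {}
--         if len(ds) == 1:
--             return dict.fromkeys(ds[0], 1)
--         mid = len(ds) // 2
--         left = counts_of(ds[:mid])
--         for key, c in counts_of(ds[mid:]).items():
--             left[key] = left.get(key, 0) + c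
--         return left
--     counts = counts_of(dictionaries)
--     max_count = max(counts.values(), default=0)
--     return [key for key, count in counts.items() if count == max_count], max_count
-- ===== Notes on version B (the rewrite author's own statement) =====
-- stated objective: alternative
-- what changed: Replaces A's sequential counter dict plus fused running-max-with-reset selection loop by a divide-and-conquer count: leaves are dict.fromkeys of one dictionary, halves are merged recursively, and the result is selected in two separate passes (max over values, then filter).
import Mathlib
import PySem

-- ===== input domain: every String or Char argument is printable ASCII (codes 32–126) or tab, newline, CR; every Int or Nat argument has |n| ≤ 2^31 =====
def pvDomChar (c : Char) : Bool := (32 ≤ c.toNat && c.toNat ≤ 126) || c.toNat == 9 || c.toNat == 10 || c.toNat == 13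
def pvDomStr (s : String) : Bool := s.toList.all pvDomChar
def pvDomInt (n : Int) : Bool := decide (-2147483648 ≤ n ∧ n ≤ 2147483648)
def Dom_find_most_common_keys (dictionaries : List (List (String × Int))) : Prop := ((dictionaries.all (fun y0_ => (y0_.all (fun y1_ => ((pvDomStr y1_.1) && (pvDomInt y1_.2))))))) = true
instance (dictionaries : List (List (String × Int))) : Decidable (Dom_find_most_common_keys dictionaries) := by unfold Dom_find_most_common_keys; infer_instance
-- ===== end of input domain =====

-- B counts keys by divide and conquer (recursively merging the counts of the two halves)
-- instead of A's sequential counter dict, and selects the winners in two separate passes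
-- (max over the values, then filter) instead of A's fused running-max-with-reset loop.

-- ===== PORT A =====
-- `dictionary.keys()`: the dict's distinct keys in first-occurrence order = Set.ofList of the assoc list's keys
def find_most_common_keys (dictionaries : List (List (String × Int))) : List String × Int :=
  let key_counter : PySem.Dict String Int :=
    dictionaries.foldl (fun kc dictionary =>
      ((PySem.Set.ofList (dictionary.map Prod.fst)).foldl
        (fun (st : PySem.Dict String Int × PySem.Set String) key =>
          if key ∈ st.2 then st
          else (st.1.insert key (st.1.getD key 0 + 1), st.2.add key))
        (kc, ([] : PySem.Set String))).1)
      PySem.Dict.empty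
  key_counter.items.foldl (fun (st : List String × Int) kv =>
      if kv.2 > st.2 then ([kv.1], kv.2)
      else if kv.2 == st.2 then (st.1 ++ [kv.1], st.2)
      else st)
    ([], 0)

-- ===== PORT B =====
-- `left[key] = left.get(key, 0) + c` over `right.items()`
def pvMergeCounts (left right : PySem.Dict String Int) : PySem.Dict String Int :=
  right.items.foldl (fun l kv => l.insert kv.1 (l.getD kv.1 0 + kv.2)) left

-- counts_of: [] → {}, one dict → dict.fromkeys(d, 1), else merge the two halves
def pvCountsOf : List (List (String × Int)) → PySem.Dict String Int
  | [] => PySem.Dict.empty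
  | [d] => (PySem.Set.ofList (d.map Prod.fst)).foldl
      (fun c key => c.insert key 1) PySem.Dict.empty
  | d1 :: d2 :: rest =>
      pvMergeCounts
        (pvCountsOf ((d1 :: d2 :: rest).take ((d1 :: d2 :: rest).length / 2)))
        (pvCountsOf ((d1 :: d2 :: rest).drop ((d1 :: d2 :: rest).length / 2)))
  termination_by ds => ds.length
  decreasing_by
    · simp only [List.length_take, List.length_cons]; omega
    · simp only [List.length_drop, List.length_cons]; omega

def find_most_common_keys_alt (dictionaries : List (List (String × Int))) : List String × Int :=
  let counts : PySem.Dict String Int := pvCountsOf dictionaries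
  let max_count : Int := PySem.List.maxD counts.values (fun y => y) 0
  ((counts.items.filter (fun kv => kv.2 == max_count)).map Prod.fst, max_count)

-- ===== PRECONDITION & SPEC =====
def Spec_find_most_common_keys (dictionaries : List (List (String × Int))) (out : List String × Int) : Prop := out = find_most_common_keys_alt dictionaries
instance (dictionaries : List (List (String × Int))) (out : List String × Int) : Decidable (Spec_find_most_common_keys dictionaries out) := by unfold Spec_find_most_common_keys; infer_instance

-- ===== CLAIM (what is proved, stated in full; the proofs are below) =====
def Claim_equal_find_most_common_keys : Prop := ∀ (dictionaries : List (List (String × Int))), Dom_find_most_common_keys dictionaries → Spec_find_most_common_keys dictionaries (find_most_common_keys dictionaries)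

-- ===== LEMMAS AND PROOFS =====

-- the flattened multiset of per-dict distinct keys: both counts count over it
def pvKeyStream (dictionaries : List (List (String × Int))) : List String :=
  dictionaries.flatMap (fun dictionary => PySem.Set.ofList (dictionary.map Prod.fst))

-- A's inner loop over a list of Nodup keys disjoint from the seen-set never skips:
-- its counter component is the plain increment fold.
theorem seen_loop_eq (keys : List String) (hnd : keys.Nodup) :
    ∀ (d : PySem.Dict String Int) (seen : PySem.Set String), (∀ k ∈ keys, k ∉ seen) →
    (keys.foldl
      (fun (st : PySem.Dict String Int × PySem.Set String) key =>
        if key ∈ st.2 then st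
        else (st.1.insert key (st.1.getD key 0 + 1), st.2.add key))
      (d, seen)).1
    = keys.foldl (fun c key => c.insert key (c.getD key 0 + 1)) d := by
  induction keys with
  | nil => intro d seen _; rfl
  | cons k rest ih =>
    intro d seen hdisj
    have hk : k ∉ seen := hdisj k (by simp)
    have hnd' := hnd
    simp only [List.nodup_cons] at hnd'
    simp only [List.foldl_cons, if_neg hk]
    exact ih hnd'.2 _ _ (by
      intro x hx
      rw [PySem.Set.mem_add]
      rintro (h | rfl)
      · exact hdisj x (by simp [hx]) h
      · exact hnd'.1 hx)

-- A's counting loops build Counter(pvKeyStream dictionaries)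
theorem a_counter_eq (dictionaries : List (List (String × Int))) :
    dictionaries.foldl (fun kc dictionary =>
      ((PySem.Set.ofList (dictionary.map Prod.fst)).foldl
        (fun (st : PySem.Dict String Int × PySem.Set String) key =>
          if key ∈ st.2 then st
          else (st.1.insert key (st.1.getD key 0 + 1), st.2.add key))
        (kc, ([] : PySem.Set String))).1)
      PySem.Dict.empty
    = PySem.Dict.counter (pvKeyStream dictionaries) := by
  rw [← PySem.Dict.foldl_insert_getD_add_one_eq_counter]
  unfold pvKeyStream
  induction dictionaries using List.reverseRecOn with
  | nil => rfl
  | append_singleton xs x ih =>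
    simp only [List.foldl_append, List.foldl_cons, List.foldl_nil, List.flatMap_append,
      List.flatMap_cons, List.flatMap_nil, List.append_nil, ih]
    exact seen_loop_eq _ (PySem.Set.nodup_ofList _) _ [] (by simp)

-- A's selection loop computes the max and the filtered key list in one pass
theorem select_loop_eq (items : List (String × Int)) :
    items.foldl (fun (st : List String × Int) kv =>
      if kv.2 > st.2 then ([kv.1], kv.2)
      else if kv.2 == st.2 then (st.1 ++ [kv.1], st.2)
      else st) ([], 0)
    = ((items.filter (fun kv => kv.2 == (items.map Prod.snd).foldl max 0)).map Prod.fst,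
        (items.map Prod.snd).foldl max 0) := by
  induction items using List.reverseRecOn with
  | nil => rfl
  | append_singleton items kv ih =>
    simp only [List.foldl_append, List.foldl_cons, List.foldl_nil, ih, List.map_append,
      List.filter_append, List.map_cons, List.map_nil]
    by_cases hgt : kv.2 > (items.map Prod.snd).foldl max 0
    · have hmax : max ((items.map Prod.snd).foldl max 0) kv.2 = kv.2 := max_eq_right hgt.le
      have hnone : items.filter (fun p => p.2 == kv.2) = [] := by
        rw [List.filter_eq_nil_iff]
        intro p hp
        have := (PySem.List.le_foldl_max (items.map Prod.snd) 0).2 p.2 (List.mem_map_of_mem hp)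
        simp only [beq_iff_eq]
        omega
      simp [hgt, hmax, hnone]
    · have hmax : max ((items.map Prod.snd).foldl max 0) kv.2 = (items.map Prod.snd).foldl max 0 :=
        max_eq_left (by omega)
      by_cases heq : kv.2 = (items.map Prod.snd).foldl max 0
      · simp [heq]
      · simp [hgt, heq, hmax]

-- a lookup after the merge fold adds the summed values of the matching pairs
theorem getD_merge_fold (ps : List (String × Int)) :
    ∀ (c : PySem.Dict String Int) (k : String),
    (ps.foldl (fun l kv => l.insert kv.1 (l.getD kv.1 0 + kv.2)) c).getD k 0
    = c.getD k 0 + ((ps.filter (fun kv => kv.1 == k)).map Prod.snd).sum := by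
  induction ps with
  | nil => intro c k; simp
  | cons kv rest ih =>
    intro c k
    simp only [List.foldl_cons, ih, List.filter_cons]
    by_cases h : kv.1 = k
    · subst h
      simp
      ring
    · have : (kv.1 == k) = false := by simp [h]
      simp [this, PySem.Dict.getD_insert, Ne.symm h]

-- filtering the items of a map over distinct keys leaves the key's single pair
theorem filter_map_pair {β : Type} (l : List String) (hnd : l.Nodup) (g : String → β)
    (k : String) :
    (l.map (fun x => (x, g x))).filter (fun kv => kv.1 == k)
    = if k ∈ l then [(k, g k)] else [] := by
  induction l with
  | nil => simp
  | cons x t ih =>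
    simp only [List.nodup_cons] at hnd
    simp only [List.map_cons, List.filter_cons]
    by_cases h : x = k
    · subst h
      simp [ih hnd.2, hnd.1]
    · have : (x == k) = false := by simp [h]
      simp only [this, Bool.false_eq_true, if_false, ih hnd.2, List.mem_cons]
      have : (k = x) = False := by simp [Ne.symm h]
      simp [this]

-- Set.update ignores duplicates of its second argument
theorem set_update_ofList (s ys : List String) :
    PySem.Set.update s (PySem.Set.ofList ys) = PySem.Set.update s ys := by
  rw [PySem.Set.update_eq_append_filter, PySem.Set.update_eq_append_filter,
    PySem.Set.ofList_ofList]

-- merging Counter(ys) into Counter(xs) is Counter(xs ++ ys)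
theorem merge_counter (xs ys : List String) :
    pvMergeCounts (PySem.Dict.counter xs) (PySem.Dict.counter ys)
    = PySem.Dict.counter (xs ++ ys) := by
  have hndL : (PySem.Dict.counter (κ := String) xs).keys.Nodup := PySem.Dict.nodup_keys_counter xs
  have hndM : (pvMergeCounts (PySem.Dict.counter xs) (PySem.Dict.counter ys)).keys.Nodup := by
    unfold pvMergeCounts
    exact PySem.Dict.nodup_keys_foldl_insert_key _ _ _ _ hndL
  have hkeys : (pvMergeCounts (PySem.Dict.counter xs) (PySem.Dict.counter ys)).keys
      = (PySem.Dict.counter (xs ++ ys)).keys := by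
    unfold pvMergeCounts
    rw [PySem.Dict.keys_foldl_insert_key]
    have hmapfst : (PySem.Dict.counter (κ := String) ys).items.map Prod.fst
        = (PySem.Dict.counter (κ := String) ys).keys := rfl
    rw [hmapfst, PySem.Dict.keys_counter, PySem.Dict.keys_counter, PySem.Dict.keys_counter,
      set_update_ofList, PySem.Set.ofList_append]
  have hgetD : ∀ k, (pvMergeCounts (PySem.Dict.counter xs) (PySem.Dict.counter ys)).getD k 0
      = (PySem.Dict.counter (xs ++ ys)).getD k 0 := by
    intro k
    unfold pvMergeCounts
    rw [getD_merge_fold, PySem.Dict.items_counter,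
      filter_map_pair _ (PySem.Set.nodup_ofList ys) _ k]
    rw [PySem.Dict.getD_counter, PySem.Dict.getD_counter, List.count_append]
    by_cases hk : k ∈ ys
    · have : k ∈ PySem.Set.ofList ys := (PySem.Set.mem_ofList _ _).mpr hk
      simp [this]
    · have h1 : k ∉ PySem.Set.ofList ys := by rw [PySem.Set.mem_ofList]; exact hk
      have h2 : List.count k ys = 0 := List.count_eq_zero_of_not_mem hk
      simp [h1, h2]
  apply PySem.Dict.ext
  rw [PySem.Dict.items_eq_map_keys _ hndM 0,
    PySem.Dict.items_eq_map_keys _ (PySem.Dict.nodup_keys_counter (xs ++ ys)) 0, hkeys]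
  exact List.map_congr_left (fun k _ => by rw [hgetD k])

-- the leaf dict.fromkeys(d, 1) is Counter of the dict's distinct keys
theorem leaf_eq_counter (ks : List String) :
    (PySem.Set.ofList ks).foldl (fun c key => c.insert key 1) PySem.Dict.empty
    = PySem.Dict.counter (PySem.Set.ofList ks) := by
  apply PySem.Dict.ext
  have hfresh := PySem.Dict.items_foldl_insert_fresh (l := PySem.Set.ofList ks)
      (k := fun x => x) (v := fun _ => (1 : Int)) (d := PySem.Dict.empty)
      (by intro a _; exact PySem.Dict.contains_empty a)
      (by simp [PySem.Set.nodup_ofList ks])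
  rw [show (fun (c : PySem.Dict String Int) (key : String) => c.insert key 1)
      = (fun (d : PySem.Dict String Int) (a : String) => d.insert a 1) from rfl, hfresh]
  rw [PySem.Dict.items_counter, PySem.Set.ofList_ofList]
  have : (PySem.Dict.empty (κ := String) (ν := Int)).items = [] := rfl
  rw [this, List.nil_append]
  refine List.map_congr_left (fun k hk => ?_)
  rw [List.count_eq_one_of_mem (PySem.Set.nodup_ofList ks) hk]
  simp

-- the divide-and-conquer count is Counter(pvKeyStream dictionaries)
theorem pvCountsOf_eq (dictionaries : List (List (String × Int))) :
    pvCountsOf dictionaries = PySem.Dict.counter (pvKeyStream dictionaries) := by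
  induction dictionaries using pvCountsOf.induct with
  | case1 => rw [pvCountsOf]; rfl
  | case2 d =>
    rw [pvCountsOf]
    unfold pvKeyStream
    simp only [List.flatMap_cons, List.flatMap_nil, List.append_nil]
    exact leaf_eq_counter _
  | case3 d1 d2 rest ih1 ih2 =>
    rw [pvCountsOf, ih1, ih2, merge_counter]
    congr 1
    unfold pvKeyStream
    rw [← List.flatMap_append, List.take_append_drop]

-- max(values, default=0) of a counter agrees with the running max from 0 over the item values
theorem maxD_id_nonneg_head (v : Int) (t : List Int) (h : 0 ≤ v) :
    PySem.List.maxD (v :: t) (fun y => y) 0 = (v :: t).foldl max 0 := by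
  have h1 : PySem.List.maxD (v :: t) (fun y => y) 0 = (PySem.List.max? (v :: t) (fun y => y)).getD 0 := rfl
  rw [h1, PySem.List.max?_id_cons, List.foldl_cons, max_eq_right h]
  rfl

theorem maxD_values_counter (xs : List String) :
    PySem.List.maxD (PySem.Dict.counter xs).values (fun y => y) 0
    = ((PySem.Dict.counter xs).items.map Prod.snd).foldl max 0 := by
  have hvals : (PySem.Dict.counter (κ := String) xs).values
      = (PySem.Dict.counter (κ := String) xs).items.map Prod.snd := rfl
  rw [hvals, PySem.Dict.items_counter, List.map_map]
  rcases h : PySem.Set.ofList xs with _ | ⟨k, ks⟩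
  · rfl
  · have hk : k ∈ xs := by
      rw [← PySem.Set.mem_ofList xs k, h]; simp
    have hpos : (0 : Int) ≤ List.count k xs := by positivity
    simpa using maxD_id_nonneg_head _ ((ks.map (Prod.snd ∘ fun k => (k, (List.count k xs : Int))))) hpos

-- ===== VERDICT (by name: the statement is the Claim_ definition above) =====
theorem find_most_common_keys_spec : Claim_equal_find_most_common_keys := by
  intro ds _
  unfold Spec_find_most_common_keys
  simp only [find_most_common_keys, find_most_common_keys_alt]
  rw [a_counter_eq ds, pvCountsOf_eq ds]
  rw [select_loop_eq]
  simp only [maxD_values_counter]
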